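-- pv_equiv track=rewrite | github.com/neogan74/dev-experiments | contests/lc/3625.CountNumberofTrapezoidsII/solution.py | count
-- ===== SOURCE A (Python) =====
-- def count(mp):
--     ans = 0
--
--     for inner in mp.values():
--         total = sum(inner.values())
--         remaining = total
--
--         for val in inner.values():
--             remaining -= val
--             ans += val * remaining
--
--     return ans
-- ===== SOURCE B (Python) =====
-- def count(mp):
--     ans = 0
--     for inner in mp.values():
--         total = 0
--         sumsq = 0
--         for val in inner.values():
--             total += val
--             sumsq += val * val
--         ans += (total * total - sumsq) // 2
--     return ans
-- ===== Notes on version B (the rewrite author's own statement) =====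
-- stated objective: simpler
-- what changed: Replaces A's running-remaining pairwise product accumulation (two passes per group: a sum pass plus a pairwise pass) with the closed-form identity sum of pairwise products = (total^2 - sum of squares)/2, computed in one pass per group.
import Mathlib
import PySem

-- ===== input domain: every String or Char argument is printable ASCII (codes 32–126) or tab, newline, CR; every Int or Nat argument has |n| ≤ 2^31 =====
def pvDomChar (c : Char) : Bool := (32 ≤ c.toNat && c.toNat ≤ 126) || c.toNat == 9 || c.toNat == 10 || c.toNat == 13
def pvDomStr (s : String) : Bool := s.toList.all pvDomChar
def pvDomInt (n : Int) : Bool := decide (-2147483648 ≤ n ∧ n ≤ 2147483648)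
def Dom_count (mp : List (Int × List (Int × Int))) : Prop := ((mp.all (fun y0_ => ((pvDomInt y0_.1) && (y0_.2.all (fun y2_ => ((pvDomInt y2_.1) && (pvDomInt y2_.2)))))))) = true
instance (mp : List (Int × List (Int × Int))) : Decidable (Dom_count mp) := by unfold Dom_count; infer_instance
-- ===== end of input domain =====

-- B replaces A's running-remaining pairwise accumulation by the per-group
-- closed form (total² − Σ val²)/2, computed in one pass per group (simpler).

-- ===== PORT A =====
-- for inner in mp.values(): total = sum(inner.values()); remaining = total;
--   for val in inner.values(): remaining -= val; ans += val * remaining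
def count (mp : List (Int × List (Int × Int))) : Int :=
  mp.foldl (fun ans kv =>
    let inner := kv.2
    let total := inner.foldl (fun s p => s + p.2) 0
    (inner.foldl (fun (st : Int × Int) p =>
      let remaining := st.2 - p.2
      (st.1 + p.2 * remaining, remaining)) (ans, total)).1) 0

-- ===== PORT B =====
-- one pass per group accumulating (total, sumsq); ans += (total*total - sumsq) // 2
def count_alt (mp : List (Int × List (Int × Int))) : Int :=
  mp.foldl (fun ans kv =>
    let ts := kv.2.foldl (fun (st : Int × Int) p => (st.1 + p.2, st.2 + p.2 * p.2)) (0, 0)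
    ans + PySem.Int.floordiv (ts.1 * ts.1 - ts.2) 2) 0

-- ===== PRECONDITION & SPEC =====
def Spec_count (mp : List (Int × List (Int × Int))) (out : Int) : Prop := out = count_alt mp
instance (mp : List (Int × List (Int × Int))) (out : Int) : Decidable (Spec_count mp out) := by unfold Spec_count; infer_instance

-- ===== CLAIM (what is proved, stated in full; the proofs are below) =====
def Claim_equal_count : Prop := ∀ (mp : List (Int × List (Int × Int))), Dom_count mp → Spec_count mp (count mp)

-- ===== LEMMAS AND PROOFS =====

def pvSum (l : List (Int × Int)) : Int := l.foldl (fun s p => s + p.2) 0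
def pvSq (l : List (Int × Int)) : Int := l.foldl (fun s p => s + p.2 * p.2) 0

theorem pvSum_cons (p : Int × Int) (l : List (Int × Int)) :
    pvSum (p :: l) = p.2 + pvSum l := by
  have h : ∀ (l : List (Int × Int)) (a b : Int),
      l.foldl (fun s q => s + q.2) (a + b) = a + l.foldl (fun s q => s + q.2) b := by
    intro l
    induction l with
    | nil => intro a b; rfl
    | cons q t ih => intro a b; simp only [List.foldl]; rw [add_assoc, ih]
  simpa [pvSum] using h l p.2 0

theorem pvSq_cons (p : Int × Int) (l : List (Int × Int)) :
    pvSq (p :: l) = p.2 * p.2 + pvSq l := by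
  have h : ∀ (l : List (Int × Int)) (a b : Int),
      l.foldl (fun s q => s + q.2 * q.2) (a + b) = a + l.foldl (fun s q => s + q.2 * q.2) b := by
    intro l
    induction l with
    | nil => intro a b; rfl
    | cons q t ih => intro a b; simp only [List.foldl]; rw [add_assoc, ih]
  simpa [pvSq] using h l (p.2 * p.2) 0

-- A's inner loop, characterised: twice the gain equals rem² − (rem − S)² − Q
theorem inner_char (l : List (Int × Int)) (ans rem : Int) :
    2 * ((l.foldl (fun (st : Int × Int) p =>
        let remaining := st.2 - p.2
        (st.1 + p.2 * remaining, remaining)) (ans, rem)).1 - ans)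
      = rem * rem - (rem - pvSum l) * (rem - pvSum l) - pvSq l := by
  induction l generalizing ans rem with
  | nil => simp [pvSum, pvSq]
  | cons p t ih =>
    simp only [List.foldl, pvSum_cons, pvSq_cons]
    have := ih (ans + p.2 * (rem - p.2)) (rem - p.2)
    ring_nf
    ring_nf at this
    linarith

theorem bsum_char (l : List (Int × Int)) :
    l.foldl (fun (st : Int × Int) p => (st.1 + p.2, st.2 + p.2 * p.2)) (0, 0)
      = (pvSum l, pvSq l) := by
  have h : ∀ (l : List (Int × Int)) (a b : Int),
      l.foldl (fun (st : Int × Int) p => (st.1 + p.2, st.2 + p.2 * p.2)) (a, b)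
        = (a + pvSum l, b + pvSq l) := by
    intro l
    induction l with
    | nil => intro a b; simp [pvSum, pvSq]
    | cons p t ih =>
      intro a b
      simp only [List.foldl, pvSum_cons, pvSq_cons]
      rw [ih]
      simp only [Prod.mk.injEq]
      constructor <;> ring
  simpa using h l 0 0

theorem sq_sub_even (l : List (Int × Int)) : 2 ∣ pvSum l * pvSum l - pvSq l := by
  induction l with
  | nil => simp [pvSum, pvSq]
  | cons p t ih =>
    rw [pvSum_cons, pvSq_cons]
    obtain ⟨k, hk⟩ := ih
    exact ⟨p.2 * pvSum t + k, by linear_combination hk⟩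

-- per-group agreement: A's inner fold gain = floordiv (S² − Q) 2
theorem group_eq (l : List (Int × Int)) (ans : Int) :
    (l.foldl (fun (st : Int × Int) p =>
        let remaining := st.2 - p.2
        (st.1 + p.2 * remaining, remaining)) (ans, pvSum l)).1
      = ans + PySem.Int.floordiv (pvSum l * pvSum l - pvSq l) 2 := by
  have h := inner_char l ans (pvSum l)
  have hd := sq_sub_even l
  obtain ⟨k, hk⟩ := hd
  rw [PySem.Int.floordiv_eq_ediv_of_pos (by norm_num : (0:Int) < 2)]
  rw [hk]
  have hk2 : (2 * k) / 2 = k := by omega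
  rw [hk2]
  have : pvSum l * pvSum l - (pvSum l - pvSum l) * (pvSum l - pvSum l) - pvSq l
      = pvSum l * pvSum l - pvSq l := by ring
  rw [this, hk] at h
  linarith

theorem count_eq (mp : List (Int × List (Int × Int))) : count mp = count_alt mp := by
  unfold count count_alt
  have h : ∀ (mp : List (Int × List (Int × Int))) (a : Int),
      mp.foldl (fun ans kv =>
        let inner := kv.2
        let total := inner.foldl (fun s p => s + p.2) 0
        (inner.foldl (fun (st : Int × Int) p =>
          let remaining := st.2 - p.2
          (st.1 + p.2 * remaining, remaining)) (ans, total)).1) a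
      = mp.foldl (fun ans kv =>
        let ts := kv.2.foldl (fun (st : Int × Int) p => (st.1 + p.2, st.2 + p.2 * p.2)) (0, 0)
        ans + PySem.Int.floordiv (ts.1 * ts.1 - ts.2) 2) a := by
    intro mp
    induction mp with
    | nil => intro a; rfl
    | cons kv t ih =>
      intro a
      simp only [List.foldl]
      rw [ih]
      congr 1
      rw [bsum_char]
      exact group_eq kv.2 a
  exact h mp 0

-- ===== VERDICT (by name: the statement is the Claim_ definition above) =====
theorem count_spec : Claim_equal_count := by
  intro mp _
  unfold Spec_count
  exact count_eq mp
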